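-- pv_equiv track=rewrite | github.com/VasiaBirchak/Simple-test-task | task.py | countSmileys1
-- ===== SOURCE A (Python) =====
-- def countSmileys1(arr):
--     a = 0
--     for i in range(len(arr)):
--         if len(arr[i])==2:
--             if arr[i][0] == ':' or arr[i][0] == ';':
--                 if arr[i][1] == ')' or arr[i][1] == 'D':
--                     a += 1
--         if len(arr[i])==3:
--             if arr[i][0] == ':' or arr[i][0] == ';':
--                 if arr[i][1] == '-' or arr[i][1] == '~':
--                     if arr[i][2] == ')' or arr[i][2] == 'D':
--                         a +=1
--     return a
-- ===== SOURCE B (Python) =====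
-- # B: parse each string with a small DFA (eye -> optional nose -> mouth -> end)
-- # instead of A's length-indexed character branch cascade.
--
-- def _accepts(s):
--     # states: 0 expect eye, 1 expect nose or mouth, 2 expect mouth, 3 done
--     state = 0
--     for c in s:
--         if state == 0:
--             if c == ':' or c == ';':
--                 state = 1
--             else:
--                 return False
--         elif state == 1:
--             if c == '-' or c == '~':
--                 state = 2
--             elif c == ')' or c == 'D':
--                 state = 3
--             else:
--                 return False
--         elif state == 2:
--             if c == ')' or c == 'D':
--                 state = 3
--             else:
--                 return False
--         else:
--             return False
--     return state == 3
--
-- def countSmileys1(arr):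
--     return sum(map(_accepts, arr))
-- ===== Notes on version B (the rewrite author's own statement) =====
-- stated objective: alternative
-- what changed: Replaces A's length-indexed nested character branches with a four-state DFA that parses each string character by character (eye, optional nose, mouth, end) and sums the accepts.
import Mathlib
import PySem

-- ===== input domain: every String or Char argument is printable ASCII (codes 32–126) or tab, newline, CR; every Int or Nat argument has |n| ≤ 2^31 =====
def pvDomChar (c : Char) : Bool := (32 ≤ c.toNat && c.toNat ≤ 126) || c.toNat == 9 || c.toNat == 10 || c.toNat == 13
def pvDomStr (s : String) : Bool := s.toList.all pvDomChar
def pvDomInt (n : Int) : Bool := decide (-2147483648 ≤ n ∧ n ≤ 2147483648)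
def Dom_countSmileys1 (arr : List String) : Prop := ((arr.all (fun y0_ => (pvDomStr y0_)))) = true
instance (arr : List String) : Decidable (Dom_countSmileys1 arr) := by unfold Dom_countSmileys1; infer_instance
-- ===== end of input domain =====

-- B parses each string with a four-state DFA (eye, optional nose, mouth, end) and sums
-- the accepts, instead of A's length-indexed nested character branches (objective: alternative).

-- ===== PORT A =====
-- A iterates i over range(len(arr)) reading arr[i]; the fold below visits exactly those
-- elements in order. Indexing arr[i][k] happens only after the length test, so the
-- in-range getD 0/1/2 accesses are exact.
def countSmileys1 (arr : List String) : Int :=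
  arr.foldl (fun a s =>
    let cs := s.toList
    let a :=
      if cs.length = 2 then
        if cs.getD 0 ' ' = ':' ∨ cs.getD 0 ' ' = ';' then
          if cs.getD 1 ' ' = ')' ∨ cs.getD 1 ' ' = 'D' then a + 1 else a
        else a
      else a
    if cs.length = 3 then
      if cs.getD 0 ' ' = ':' ∨ cs.getD 0 ' ' = ';' then
        if cs.getD 1 ' ' = '-' ∨ cs.getD 1 ' ' = '~' then
          if cs.getD 2 ' ' = ')' ∨ cs.getD 2 ' ' = 'D' then a + 1 else a
        else a
      else a
    else a) 0

-- ===== PORT B =====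
-- the DFA loop of _accepts; Python's early 'return False' is the 'false' branches here
def pvRun : Nat → List Char → Bool
  | state, [] => state == 3
  | state, c :: cs =>
    if state = 0 then
      if c = ':' ∨ c = ';' then pvRun 1 cs else false
    else if state = 1 then
      if c = '-' ∨ c = '~' then pvRun 2 cs
      else if c = ')' ∨ c = 'D' then pvRun 3 cs
      else false
    else if state = 2 then
      if c = ')' ∨ c = 'D' then pvRun 3 cs else false
    else false

def pvAccepts (s : String) : Bool := pvRun 0 s.toList

-- sum(map(_accepts, arr)) : True counts as 1
def countSmileys1_alt (arr : List String) : Int :=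
  (arr.map pvAccepts).foldl (fun a b => a + (if b then 1 else 0)) 0

-- ===== PRECONDITION & SPEC =====
def Spec_countSmileys1 (arr : List String) (out : Int) : Prop := out = countSmileys1_alt arr
instance (arr : List String) (out : Int) : Decidable (Spec_countSmileys1 arr out) := by unfold Spec_countSmileys1; infer_instance

-- ===== CLAIM (what is proved, stated in full; the proofs are below) =====
def Claim_equal_countSmileys1 : Prop := ∀ (arr : List String), Dom_countSmileys1 arr → Spec_countSmileys1 arr (countSmileys1 arr)

-- ===== LEMMAS AND PROOFS =====

theorem pvRun0_cons (c : Char) (cs : List Char) :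
    pvRun 0 (c :: cs) = if c = ':' ∨ c = ';' then pvRun 1 cs else false := by
  simp only [pvRun]; norm_num

theorem pvRun1_cons (c : Char) (cs : List Char) :
    pvRun 1 (c :: cs) = if c = '-' ∨ c = '~' then pvRun 2 cs
      else if c = ')' ∨ c = 'D' then pvRun 3 cs else false := by
  simp only [pvRun]; norm_num

theorem pvRun2_cons (c : Char) (cs : List Char) :
    pvRun 2 (c :: cs) = if c = ')' ∨ c = 'D' then pvRun 3 cs else false := by
  simp only [pvRun]; norm_num

theorem pvRun3_cons (c : Char) (cs : List Char) : pvRun 3 (c :: cs) = false := by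
  simp only [pvRun]; norm_num

theorem pvRun_nil (st : Nat) : pvRun st [] = (st == 3) := by simp only [pvRun]

theorem pv_step_eq (a : Int) (s : String) :
    (let cs := s.toList
     let a :=
       if cs.length = 2 then
         if cs.getD 0 ' ' = ':' ∨ cs.getD 0 ' ' = ';' then
           if cs.getD 1 ' ' = ')' ∨ cs.getD 1 ' ' = 'D' then a + 1 else a
         else a
       else a
     if cs.length = 3 then
       if cs.getD 0 ' ' = ':' ∨ cs.getD 0 ' ' = ';' then
         if cs.getD 1 ' ' = '-' ∨ cs.getD 1 ' ' = '~' then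
           if cs.getD 2 ' ' = ')' ∨ cs.getD 2 ' ' = 'D' then a + 1 else a
         else a
       else a
     else a) = a + (if pvAccepts s then 1 else 0) := by
  unfold pvAccepts
  rcases hcs : s.toList with _ | ⟨c0, _ | ⟨c1, _ | ⟨c2, _ | ⟨c3, rest⟩⟩⟩⟩
  · simp [pvRun_nil]
  · simp only [List.length_cons, List.length_nil, pvRun0_cons]
    split_ifs <;> simp_all [pvRun_nil]
  · simp only [List.length_cons, List.length_nil, List.getD, List.getElem?_cons_zero,
      List.getElem?_cons_succ, Option.getD_some, pvRun0_cons, pvRun1_cons]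
    by_cases h1 : c1 = ')' ∨ c1 = 'D'
    · have h2 : ¬(c1 = '-' ∨ c1 = '~') := by rcases h1 with rfl | rfl <;> simp
      split_ifs <;> simp_all [pvRun_nil]
    · split_ifs <;> simp_all [pvRun_nil]
  · simp only [List.length_cons, List.length_nil, List.getD, List.getElem?_cons_zero,
      List.getElem?_cons_succ, Option.getD_some, pvRun0_cons, pvRun1_cons, pvRun2_cons,
      pvRun3_cons]
    split_ifs <;> simp_all [pvRun_nil]
  · simp only [List.length_cons, pvRun0_cons, pvRun1_cons, pvRun2_cons, pvRun3_cons]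
    split_ifs <;> simp_all

theorem countSmileys1_fold_eq (arr : List String) (a : Int) :
    arr.foldl (fun a s =>
      let cs := s.toList
      let a :=
        if cs.length = 2 then
          if cs.getD 0 ' ' = ':' ∨ cs.getD 0 ' ' = ';' then
            if cs.getD 1 ' ' = ')' ∨ cs.getD 1 ' ' = 'D' then a + 1 else a
          else a
        else a
      if cs.length = 3 then
        if cs.getD 0 ' ' = ':' ∨ cs.getD 0 ' ' = ';' then
          if cs.getD 1 ' ' = '-' ∨ cs.getD 1 ' ' = '~' then
            if cs.getD 2 ' ' = ')' ∨ cs.getD 2 ' ' = 'D' then a + 1 else a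
          else a
        else a
      else a) a
    = (arr.map pvAccepts).foldl (fun a b => a + (if b then 1 else 0)) a := by
  induction arr generalizing a with
  | nil => rfl
  | cons s t ih =>
    simp only [List.foldl_cons, List.map_cons]
    rw [pv_step_eq a s, ih]

-- ===== VERDICT (by name: the statement is the Claim_ definition above) =====
theorem countSmileys1_spec : Claim_equal_countSmileys1 := by
  intro arr _
  unfold Spec_countSmileys1 countSmileys1 countSmileys1_alt
  exact countSmileys1_fold_eq arr 0
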